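-- pv_equiv track=rewrite | github.com/paiml/depyler | examples/hard_memoization_patterns.py | group_anagrams_count
-- ===== SOURCE A (Python) =====
-- def group_anagrams_count(words: list[str]) -> int:
--     """Count distinct anagram groups using sorted-key dict lookup.
--
--     Tests string sorting as dict key, dict[str, int] group counting,
--     and string manipulation within a collection iteration.
--     """
--     groups: dict[str, int] = {}
--     for word in words:
--         chars: list[str] = []
--         for ch in word:
--             chars.append(ch)
--         chars.sort()
--         key: str = "".join(chars)
--         if key in groups:
--             groups[key] += 1
--         else:
--             groups[key] = 1
--     count: int = 0
--     for key in groups: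
--         count += 1
--     return count
-- ===== SOURCE B (Python) =====
-- def group_anagrams_count(words: list[str]) -> int:
--     """Count distinct anagram groups via character-frequency signatures.
--
--     Instead of sorting each word's characters, build a per-word frequency
--     dict and use its sorted item tuple as a canonical signature.
--     """
--     seen: set = set()
--     for word in words:
--         counts: dict = {}
--         for ch in word:
--             counts[ch] = counts.get(ch, 0) + 1
--         seen.add(tuple(sorted(counts.items())))
--     return len(seen)
-- ===== Notes on version B (the rewrite author's own statement) =====
-- stated objective: alternative
-- what changed: B canonicalizes each word by a character-frequency signature (dict of counts, turned into a sorted items tuple) collected in a set, instead of A's sorted-character string used as a dict key with group counting.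
import Mathlib
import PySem

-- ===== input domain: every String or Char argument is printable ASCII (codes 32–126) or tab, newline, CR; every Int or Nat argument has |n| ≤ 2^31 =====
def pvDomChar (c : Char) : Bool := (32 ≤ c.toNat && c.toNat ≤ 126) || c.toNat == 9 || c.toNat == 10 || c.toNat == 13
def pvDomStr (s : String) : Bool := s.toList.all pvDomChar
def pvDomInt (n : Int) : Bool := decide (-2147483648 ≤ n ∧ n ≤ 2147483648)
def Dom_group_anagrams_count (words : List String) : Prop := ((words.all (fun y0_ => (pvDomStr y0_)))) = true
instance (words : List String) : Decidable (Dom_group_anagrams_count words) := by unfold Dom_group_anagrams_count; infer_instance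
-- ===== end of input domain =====

-- B replaces A's sort-each-word dict keying by per-word character-frequency signatures
-- collected in a set (alternative canonicalization; same anagram grouping).

-- ===== PORT A =====
def group_anagrams_count (words : List String) : Int :=
  let groups : PySem.Dict String Int :=
    words.foldl (fun groups word =>
      -- chars = []; for ch in word: chars.append(ch)
      let chars : List Char := word.toList.foldl (fun cs ch => cs ++ [ch]) []
      -- chars.sort()
      let chars := PySem.List.sorted chars (fun x => x) false
      -- key = "".join(chars)  (join of the single-char strings = the string of chars)
      let key : String := String.ofList chars
      if groups.contains key then groups.insert key (groups.getD key 0 + 1)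
      else groups.insert key 1) PySem.Dict.empty
  -- count = 0; for key in groups: count += 1
  groups.keys.foldl (fun count _ => count + 1) 0

-- ===== PORT B =====
def group_anagrams_count_alt (words : List String) : Int :=
  let seen : PySem.Set (List (Char × Int)) :=
    words.foldl (fun seen word =>
      -- counts = {}; for ch in word: counts[ch] = counts.get(ch, 0) + 1
      let counts : PySem.Dict Char Int :=
        word.toList.foldl (fun d ch => d.insert ch (d.getD ch 0 + 1)) PySem.Dict.empty
      -- seen.add(tuple(sorted(counts.items(), key=lambda p: p[0])))
      seen.add (PySem.List.sorted counts.items (fun p => p.1) false)) PySem.Set.empty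
  PySem.Set.len seen

-- ===== PRECONDITION & SPEC =====
def Spec_group_anagrams_count (words : List String) (out : Int) : Prop := out = group_anagrams_count_alt words
instance (words : List String) (out : Int) : Decidable (Spec_group_anagrams_count words out) := by unfold Spec_group_anagrams_count; infer_instance

-- ===== CLAIM (what is proved, stated in full; the proofs are below) =====
def Claim_equal_group_anagrams_count : Prop := ∀ (words : List String), Dom_group_anagrams_count words → Spec_group_anagrams_count words (group_anagrams_count words)

-- ===== LEMMAS AND PROOFS =====

-- A's per-word key: the word's characters sorted, as a string.
def pvKeyA (w : String) : String := String.ofList (PySem.List.sorted w.toList (fun x => x) false)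

-- B's per-word signature: counter items sorted by character.
def pvSigB (w : String) : List (Char × Int) :=
  PySem.List.sorted (PySem.Dict.counter w.toList).items (fun p => p.1) false

-- The canonical form of B's signature: sorted distinct chars, paired with counts.
def pvSigC (w : String) : List (Char × Int) :=
  (PySem.List.sorted (PySem.Set.ofList w.toList) (fun x => x) false).map
    (fun k => (k, (w.toList.count k : Int)))

theorem pv_foldl_append (l : List Char) : ∀ acc, l.foldl (fun cs ch => cs ++ [ch]) acc = acc ++ l := by
  induction l with
  | nil => simp
  | cons c t ih => intro acc; simp [List.foldl, ih]

theorem pv_foldl_count_keys (l : List String) (init : Int) :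
    l.foldl (fun count _ => count + 1) init = init + l.length := by
  induction l generalizing init with
  | nil => simp
  | cons x t ih => simp [List.foldl, ih]; omega

theorem pv_A_eq (words : List String) :
    group_anagrams_count words = ((PySem.Set.ofList (words.map pvKeyA)).length : Int) := by
  unfold group_anagrams_count
  have hbody : (fun (groups : PySem.Dict String Int) (word : String) =>
      let chars : List Char := word.toList.foldl (fun cs ch => cs ++ [ch]) []
      let chars := PySem.List.sorted chars (fun x => x) false
      let key : String := String.ofList chars
      if groups.contains key then groups.insert key (groups.getD key 0 + 1)
      else groups.insert key 1)
      = (fun groups word => groups.insert (pvKeyA word)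
          (if groups.contains (pvKeyA word) then groups.getD (pvKeyA word) 0 + 1 else 1)) := by
    funext groups word
    simp only [pv_foldl_append, List.nil_append, pvKeyA]
    split_ifs <;> rfl
  rw [hbody, pv_foldl_count_keys,
    PySem.Dict.keys_foldl_insert_key words pvKeyA _ PySem.Dict.empty]
  simp [PySem.Set.update_nil_left]

theorem pv_B_eq (words : List String) :
    group_anagrams_count_alt words = ((PySem.Set.ofList (words.map pvSigB)).length : Int) := by
  unfold group_anagrams_count_alt
  simp only [PySem.Dict.foldl_insert_getD_add_one_eq_counter]
  rw [show (fun (seen : PySem.Set (List (Char × Int))) (word : String) =>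
      seen.add (PySem.List.sorted (PySem.Dict.counter word.toList).items (fun p => p.1) false))
      = (fun seen word => seen.add (pvSigB word)) from rfl,
    ← PySem.Set.update_map_eq_foldl_add]
  show ((PySem.Set.update [] (words.map pvSigB)).len) = _
  rw [PySem.Set.update_nil_left]
  rfl

theorem pv_sigB_eq_sigC (w : String) : pvSigB w = pvSigC w := by
  unfold pvSigB pvSigC
  rw [PySem.Dict.items_counter]
  apply PySem.List.sorted_eq_of_perm_of_pairwise_lt
  · exact (PySem.List.sorted_perm _ _ _).map _
  · rw [List.pairwise_map]
    exact PySem.List.sorted_ofList_pairwise_lt w.toList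

theorem pv_sigC_iff_perm (x y : String) : pvSigC x = pvSigC y ↔ x.toList.Perm y.toList := by
  constructor
  · intro h
    have hs : PySem.List.sorted (PySem.Set.ofList x.toList) (fun k => k) false
        = PySem.List.sorted (PySem.Set.ofList y.toList) (fun k => k) false := by
      have := congrArg (List.map Prod.fst) h
      simpa [pvSigC, List.map_map, Function.comp_def] using this
    rw [List.perm_iff_count]
    intro a
    by_cases ha : a ∈ x.toList
    · have hmem : (a, (x.toList.count a : Int)) ∈ pvSigC x := by
        unfold pvSigC
        exact List.mem_map_of_mem (by
          rw [PySem.List.mem_sorted, PySem.Set.mem_ofList]; exact ha)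
      rw [h] at hmem
      unfold pvSigC at hmem
      obtain ⟨k, _, hk⟩ := List.mem_map.mp hmem
      simp only [Prod.mk.injEq] at hk
      obtain ⟨hk1, hk2⟩ := hk
      subst hk1
      exact_mod_cast hk2.symm
    · have hay : a ∉ y.toList := by
        intro hy
        have hmem : (a, (y.toList.count a : Int)) ∈ pvSigC y := by
          unfold pvSigC
          exact List.mem_map_of_mem (by
            rw [PySem.List.mem_sorted, PySem.Set.mem_ofList]; exact hy)
        rw [← h] at hmem
        unfold pvSigC at hmem
        obtain ⟨k, hkmem, hk⟩ := List.mem_map.mp hmem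
        rw [PySem.List.mem_sorted, PySem.Set.mem_ofList] at hkmem
        simp only [Prod.mk.injEq] at hk
        exact ha (hk.1 ▸ hkmem)
      simp [List.count_eq_zero_of_not_mem ha, List.count_eq_zero_of_not_mem hay]
  · intro h
    unfold pvSigC
    have hs : PySem.Set.ofList x.toList |>.Perm (PySem.Set.ofList y.toList) := by
      rw [List.perm_ext_iff_of_nodup (PySem.Set.nodup_ofList _) (PySem.Set.nodup_ofList _)]
      intro a
      rw [PySem.Set.mem_ofList, PySem.Set.mem_ofList]
      exact ⟨fun hx => h.mem_iff.mp hx, fun hy => h.mem_iff.mpr hy⟩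
    rw [PySem.List.sorted_eq_sorted_of_perm _ _ _ (fun a b hab => hab) hs]
    apply List.map_congr_left
    intro k _
    rw [h.count_eq]

theorem pv_key_iff (x y : String) : pvKeyA x = pvKeyA y ↔ pvSigB x = pvSigB y := by
  rw [pv_sigB_eq_sigC, pv_sigB_eq_sigC, pv_sigC_iff_perm]
  unfold pvKeyA
  constructor
  · intro h
    have := congrArg String.toList h
    rw [String.toList_ofList, String.toList_ofList] at this
    exact (PySem.List.sorted_id_eq_sorted_id_iff_perm _ _).mp this
  · intro h
    rw [(PySem.List.sorted_id_eq_sorted_id_iff_perm _ _).mpr h]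

theorem pv_ofList_append_singleton {α : Type} [BEq α] (l : List α) (x : α) :
    PySem.Set.ofList (l ++ [x]) = (PySem.Set.ofList l).add x := by
  rw [PySem.Set.ofList_eq_foldl, PySem.Set.ofList_eq_foldl, List.foldl_append]
  rfl

theorem pv_dedup_len {α β γ : Type} [BEq β] [LawfulBEq β] [BEq γ] [LawfulBEq γ]
    (f : α → β) (g : α → γ) (h : ∀ x y, f x = f y ↔ g x = g y) (xs : List α) :
    (PySem.Set.ofList (xs.map f)).length = (PySem.Set.ofList (xs.map g)).length := by
  induction xs using List.reverseRecOn with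
  | nil => rfl
  | append_singleton l x ih =>
    rw [List.map_append, List.map_append, List.map_singleton, List.map_singleton,
      pv_ofList_append_singleton, pv_ofList_append_singleton]
    have hmem : f x ∈ PySem.Set.ofList (l.map f) ↔ g x ∈ PySem.Set.ofList (l.map g) := by
      rw [PySem.Set.mem_ofList, PySem.Set.mem_ofList, List.mem_map, List.mem_map]
      constructor
      · rintro ⟨a, ha, hfa⟩; exact ⟨a, ha, (h a x).mp hfa⟩
      · rintro ⟨a, ha, hga⟩; exact ⟨a, ha, (h a x).mpr hga⟩
    by_cases hf : f x ∈ PySem.Set.ofList (l.map f)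
    · rw [PySem.Set.add_of_mem hf, PySem.Set.add_of_mem (hmem.mp hf)]
      exact ih
    · rw [PySem.Set.add_of_not_mem hf, PySem.Set.add_of_not_mem (fun hg => hf (hmem.mpr hg))]
      simp [ih]

-- ===== VERDICT (by name: the statement is the Claim_ definition above) =====
theorem group_anagrams_count_spec : Claim_equal_group_anagrams_count := by
  intro words _
  unfold Spec_group_anagrams_count
  rw [pv_A_eq, pv_B_eq, pv_dedup_len pvKeyA pvSigB pv_key_iff]
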